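-- pv_equiv track=rewrite | github.com/BenFisher/HackerRankPython | CodingTest/usernames.py | possibleChanges
-- ===== SOURCE A (Python) =====
-- def testUsernamesOptimized(user):
--     user_list = [ord(c) for c in list(user)]
--     for i in range(1, len(user_list)):
--         if user_list[i-1] > user_list[i]:
--             return True
--     return False
--
-- def possibleChanges(usernames):
--     ret = []
--     for name in usernames:
--         t = testUsernamesOptimized(name)
--         if t == True:
--             ret.append('YES')
--         else:
--             ret.append('NO')
--     return ret
-- ===== SOURCE B (Python) =====
-- def possibleChanges(usernames):
--     return ['NO' if list(name) == sorted(name) else 'YES' for name in usernames]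
-- ===== Notes on version B (the rewrite author's own statement) =====
-- stated objective: simpler
-- what changed: Replaces the explicit ord-array adjacency scan with early return by a one-line comprehension that marks a name 'NO' exactly when its character list equals its sorted version.
import Mathlib
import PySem

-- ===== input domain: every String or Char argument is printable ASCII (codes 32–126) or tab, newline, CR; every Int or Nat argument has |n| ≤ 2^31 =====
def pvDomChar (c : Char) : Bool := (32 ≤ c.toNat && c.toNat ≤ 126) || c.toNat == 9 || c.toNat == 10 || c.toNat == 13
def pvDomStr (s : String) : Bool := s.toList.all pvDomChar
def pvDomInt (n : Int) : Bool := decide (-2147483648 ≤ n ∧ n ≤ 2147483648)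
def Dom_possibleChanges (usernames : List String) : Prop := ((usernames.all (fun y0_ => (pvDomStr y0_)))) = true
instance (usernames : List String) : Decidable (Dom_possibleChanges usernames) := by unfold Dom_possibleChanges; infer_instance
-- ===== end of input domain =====

-- B replaces A's explicit adjacency scan by comparing each name with its sorted character list ('NO' iff equal); simpler, not faster.

-- ===== PORT A =====
-- the 'for i in range(1, len(user_list)): if …: return True' loop, early return = stop on first hit
def pvTestLoop (ul : List Int) : List Int → Bool
  | [] => false
  | i :: rest =>
    if PySem.List.pyGetD ul (i - 1) 0 > PySem.List.pyGetD ul i 0 then true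
    else pvTestLoop ul rest

def testUsernamesOptimized (user : String) : Bool :=
  let user_list : List Int := user.toList.map (fun c => (c.toNat : Int))
  pvTestLoop user_list (PySem.List.pyRange 1 user_list.length 1)

def possibleChanges (usernames : List String) : List String :=
  usernames.foldl
    (fun ret name =>
      let t := testUsernamesOptimized name
      if t = true then ret ++ ["YES"] else ret ++ ["NO"])
    []

-- ===== PORT B =====
def possibleChanges_alt (usernames : List String) : List String :=
  usernames.map (fun name =>
    if name.toList = PySem.List.sorted name.toList (fun x => x) false then "NO" else "YES")

-- ===== PRECONDITION & SPEC =====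
def Spec_possibleChanges (usernames : List String) (out : List String) : Prop := out = possibleChanges_alt usernames
instance (usernames : List String) (out : List String) : Decidable (Spec_possibleChanges usernames out) := by unfold Spec_possibleChanges; infer_instance

-- ===== CLAIM (what is proved, stated in full; the proofs are below) =====
def Claim_equal_possibleChanges : Prop := ∀ (usernames : List String), Dom_possibleChanges usernames → Spec_possibleChanges usernames (possibleChanges usernames)

-- ===== LEMMAS AND PROOFS =====

-- the early-return scan over an index list is List.any of the descent test
theorem pvTestLoop_eq_any (ul : List Int) (is : List Int) :
    pvTestLoop ul is
      = is.any (fun i => decide (PySem.List.pyGetD ul (i - 1) 0 > PySem.List.pyGetD ul i 0)) := by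
  induction is with
  | nil => rfl
  | cons i rest ih =>
    simp only [pvTestLoop, List.any_cons, ih]
    by_cases h : PySem.List.pyGetD ul (i - 1) 0 > PySem.List.pyGetD ul i 0 <;> simp [h]

-- A's scan returns false exactly when the Int list is an ascending chain
theorem pvTestLoop_false_iff (ul : List Int) :
    pvTestLoop ul (PySem.List.pyRange 1 ul.length 1) = false ↔ ul.IsChain (· ≤ ·) := by
  rw [pvTestLoop_eq_any, List.isChain_iff_getElem]
  simp only [List.any_eq_false, PySem.List.mem_pyRange_one, decide_eq_true_eq]
  constructor
  · intro h k hk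
    have h1 : (1 : Int) ≤ (k : Int) + 1 := by omega
    have h2 : ((k : Int) + 1) < ul.length := by exact_mod_cast (by omega : (k:Int)+1 < (ul.length : Int))
    have := h ((k : Int) + 1) ⟨h1, h2⟩
    rw [PySem.List.pyGetD_eq_getElem (h0 := by omega) (h1 := by omega),
        PySem.List.pyGetD_eq_getElem (h0 := by omega) (h1 := by omega)] at this
    have hk1 : ((k : Int) + 1 - 1).toNat = k := by omega
    have hk2 : ((k : Int) + 1).toNat = k + 1 := by omega
    simp only [hk1, hk2] at this
    omega
  · intro h i ⟨hi1, hi2⟩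
    rw [PySem.List.pyGetD_eq_getElem (h0 := by omega) (h1 := by omega),
        PySem.List.pyGetD_eq_getElem (h0 := by omega) (h1 := by omega)]
    have hk : ∃ k : Nat, (i : Int) = (k : Int) + 1 := ⟨(i - 1).toNat, by omega⟩
    obtain ⟨k, hkeq⟩ := hk
    subst hkeq
    have hk1 : ((k : Int) + 1 - 1).toNat = k := by omega
    have hk2 : ((k : Int) + 1).toNat = k + 1 := by omega
    simp only [hk1, hk2]
    have := h k (by omega)
    omega

-- chain on characters transfers through ord (Char.toNat is order-preserving)
theorem chain_map_ord (l : List Char) :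
    (l.map (fun c => (c.toNat : Int))).IsChain (· ≤ ·) ↔ l.IsChain (· ≤ ·) := by
  rw [List.isChain_map]
  have he : ∀ a b : Char, ((a.toNat : Int) ≤ (b.toNat : Int)) ↔ a ≤ b := fun a b => by
    constructor
    · intro hab; exact_mod_cast hab
    · intro hab; exact_mod_cast hab
  exact List.IsChain.iff he

-- B marks 'NO' exactly when A's scan finds no descent
theorem per_name (name : String) :
    (if testUsernamesOptimized name = true then "YES" else "NO")
      = (if name.toList = PySem.List.sorted name.toList (fun x => x) false then "NO" else "YES") := by
  have key : testUsernamesOptimized name = false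
      ↔ name.toList = PySem.List.sorted name.toList (fun x => x) false := by
    rw [show testUsernamesOptimized name
          = pvTestLoop (name.toList.map (fun c => (c.toNat : Int)))
              (PySem.List.pyRange 1 (name.toList.map (fun c => (c.toNat : Int))).length 1) from rfl]
    rw [pvTestLoop_false_iff, chain_map_ord, List.isChain_iff_pairwise]
    constructor
    · intro h
      exact (PySem.List.sorted_eq_self_of_pairwise _ _ h).symm
    · intro h
      rw [h]
      exact PySem.List.sorted_pairwise _ _
  by_cases hb : testUsernamesOptimized name = true
  · have : ¬ (name.toList = PySem.List.sorted name.toList (fun x => x) false) := by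
      intro hs; rw [← key] at hs; simp [hs] at hb
    rw [if_pos hb, if_neg this]
  · have hf : testUsernamesOptimized name = false := by simpa using hb
    have heq := key.mp hf
    rw [if_neg (by simp [hf]), if_pos heq]

-- ===== VERDICT (by name: the statement is the Claim_ definition above) =====
theorem possibleChanges_spec : Claim_equal_possibleChanges := by
  intro usernames _
  show possibleChanges usernames = possibleChanges_alt usernames
  unfold possibleChanges possibleChanges_alt
  rw [show (fun (ret : List String) name =>
        let t := testUsernamesOptimized name
        if t = true then ret ++ ["YES"] else ret ++ ["NO"])
      = (fun ret name => ret ++ [if testUsernamesOptimized name = true then "YES" else "NO"]) from by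
        funext ret name; by_cases h : testUsernamesOptimized name = true <;> simp [h]]
  rw [PySem.List.foldl_append_singleton_eq_map]
  simp only [List.nil_append]
  exact List.map_congr_left (fun name _ => per_name name)
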